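-- pv_equiv track=rewrite | github.com/wilkodekkers/advent-of-code | 2015/day3.py | part2
-- ===== SOURCE A (Python) =====
-- def part2(commands):
--     locations = [(0, 0)]
--     santa = [0, 0]
--     robot = [0, 0]
--     santa_turn = True
--     for command in commands:
--         if command == 'v':
--             if santa_turn:
--                 santa[1] += 1
--             else:
--                 robot[1] += 1
--         elif command == '>':
--             if santa_turn:
--                 santa[0] += 1
--             else:
--                 robot[0] += 1
--         elif command == '^':
--             if santa_turn:
--                 santa[1] -= 1
--             else:
--                 robot[1] -= 1
--         elif command == '<':
--             if santa_turn:
--                 santa[0] -= 1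
--             else:
--                 robot[0] -= 1
--         locations.append(tuple(santa if santa_turn else robot))
--         santa_turn = False if santa_turn else True
--     return len(set(locations))
-- ===== SOURCE B (Python) =====
-- def _delta(c):
--     if c == '^':
--         return (0, -1)
--     if c == 'v':
--         return (0, 1)
--     if c == '<':
--         return (-1, 0)
--     if c == '>':
--         return (1, 0)
--     return (0, 0)
--
--
-- def _visits(cmds):
--     pos = (0, 0)
--     seen = {pos}
--     for c in cmds:
--         dx, dy = _delta(c)
--         pos = (pos[0] + dx, pos[1] + dy)
--         seen.add(pos)
--     return seen
--
--
-- def _split(cmds):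
--     # split the command stream by index parity: even indices -> santa, odd -> robot
--     santa, robot = [], []
--     for i, c in enumerate(cmds):
--         if i % 2 == 0:
--             santa.append(c)
--         else:
--             robot.append(c)
--     return santa, robot
--
--
-- def part2(commands):
--     santa_cmds, robot_cmds = _split(commands)
--     return len(_visits(santa_cmds) | _visits(robot_cmds))
-- ===== Notes on version B (the rewrite author's own statement) =====
-- stated objective: alternative
-- what changed: Replaces A's single interleaved loop with a santa_turn toggle and one shared locations list by an index-parity split of the command stream: each agent is simulated independently by the same small walker and the answer is the size of the union of the two visited sets.
import Mathlib
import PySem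

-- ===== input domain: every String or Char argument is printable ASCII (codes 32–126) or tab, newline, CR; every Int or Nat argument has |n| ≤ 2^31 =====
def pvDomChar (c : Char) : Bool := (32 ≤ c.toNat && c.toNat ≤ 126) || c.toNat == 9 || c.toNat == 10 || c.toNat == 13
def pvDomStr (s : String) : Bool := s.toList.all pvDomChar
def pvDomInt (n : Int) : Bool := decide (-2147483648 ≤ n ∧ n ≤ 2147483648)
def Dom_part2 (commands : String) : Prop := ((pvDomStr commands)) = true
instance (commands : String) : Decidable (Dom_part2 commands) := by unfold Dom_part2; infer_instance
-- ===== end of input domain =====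

-- B replaces A's interleaved santa_turn-toggle loop by an index-parity split of the
-- command stream, simulating each agent independently and taking the union of visited sets
-- (alternative decomposition, same asymptotic cost).


-- ===== PORT A =====
-- state: (locations, santa, robot, santa_turn)
def part2Step (st : List (Int × Int) × (Int × Int) × (Int × Int) × Bool) (c : Char) :
    List (Int × Int) × (Int × Int) × (Int × Int) × Bool :=
  let (locs, santa, robot, turn) := st
  let (santa, robot) :=
    if c = 'v' then
      if turn then ((santa.1, santa.2 + 1), robot) else (santa, (robot.1, robot.2 + 1))
    else if c = '>' then
      if turn then ((santa.1 + 1, santa.2), robot) else (santa, (robot.1 + 1, robot.2))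
    else if c = '^' then
      if turn then ((santa.1, santa.2 - 1), robot) else (santa, (robot.1, robot.2 - 1))
    else if c = '<' then
      if turn then ((santa.1 - 1, santa.2), robot) else (santa, (robot.1 - 1, robot.2))
    else (santa, robot)
  (locs ++ [if turn then santa else robot], santa, robot, if turn then false else true)

def part2 (commands : String) : Int :=
  let st := commands.toList.foldl part2Step ([((0 : Int), (0 : Int))], (0, 0), (0, 0), true)
  ((PySem.Set.ofList st.1).length : Int)

-- ===== PORT B =====
def part2Delta (c : Char) : Int × Int :=
  if c = '^' then (0, -1)
  else if c = 'v' then (0, 1)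
  else if c = '<' then (-1, 0)
  else if c = '>' then (1, 0)
  else (0, 0)

def part2VisitStep (st : (Int × Int) × PySem.Set (Int × Int)) (c : Char) :
    (Int × Int) × PySem.Set (Int × Int) :=
  let d := part2Delta c
  let pos := (st.1.1 + d.1, st.1.2 + d.2)
  (pos, PySem.Set.add st.2 pos)

def part2Visits (cmds : List Char) : PySem.Set (Int × Int) :=
  (cmds.foldl part2VisitStep ((0, 0), PySem.Set.ofList [((0 : Int), (0 : Int))])).2

def part2SplitStep (st : List Char × List Char) (p : Int × Char) : List Char × List Char :=
  if PySem.Int.mod p.1 2 = 0 then (st.1 ++ [p.2], st.2) else (st.1, st.2 ++ [p.2])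

def part2_alt (commands : String) : Int :=
  let sr := (PySem.List.enumerate commands.toList 0).foldl part2SplitStep ([], [])
  ((PySem.Set.union (part2Visits sr.1) (part2Visits sr.2)).length : Int)

-- ===== PRECONDITION & SPEC =====
def Spec_part2 (commands : String) (out : Int) : Prop := out = part2_alt commands
instance (commands : String) (out : Int) : Decidable (Spec_part2 commands out) := by unfold Spec_part2; infer_instance

-- ===== CLAIM (what is proved, stated in full; the proofs are below) =====
def Claim_equal_part2 : Prop := ∀ (commands : String), Dom_part2 commands → Spec_part2 commands (part2 commands)

-- ===== LEMMAS AND PROOFS =====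

-- proof helper: the even-index and odd-index sublists, by structural recursion two at a time
def part2Split : List Char → List Char × List Char
  | [] => ([], [])
  | [c] => ([c], [])
  | c :: d :: rest =>
    let (s, r) := part2Split rest
    (c :: s, d :: r)

-- B's index-parity loop computes exactly the two-at-a-time split
theorem part2_split_fold :
    ∀ (l : List Char) (s : Int) (sa ra : List Char), PySem.Int.mod s 2 = 0 →
      (PySem.List.enumerate l s).foldl part2SplitStep (sa, ra) =
        (sa ++ (part2Split l).1, ra ++ (part2Split l).2) := by
  intro l
  induction l using part2Split.induct with
  | case1 => intro s sa ra _; simp [PySem.List.enumerate_nil, part2Split]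
  | case2 c =>
    intro s sa ra hs
    have hdvd : (2 : Int) ∣ s := by rwa [PySem.Int.mod_eq_zero_iff_dvd] at hs
    simp [PySem.List.enumerate_cons, PySem.List.enumerate_nil, part2Split, part2SplitStep,
      hdvd]
  | case3 c d rest sc rc hsplit ih =>
    intro s sa ra hs
    have hdvd : (2 : Int) ∣ s := by rwa [PySem.Int.mod_eq_zero_iff_dvd] at hs
    have h1 : PySem.Int.mod (s + 1) 2 ≠ 0 := by
      rw [Ne, PySem.Int.mod_eq_zero_iff_dvd]; omega
    have h2' : PySem.Int.mod (s + 1 + 1) 2 = 0 := by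
      rw [PySem.Int.mod_eq_zero_iff_dvd]; omega
    rw [PySem.List.enumerate_cons, PySem.List.enumerate_cons]
    simp only [List.foldl, part2SplitStep, hs, h1, reduceIte]
    rw [ih (s + 1 + 1) _ _ h2']
    simp [part2Split, hsplit]

-- the positions visited after each command, starting (exclusive) at p
def part2Traj (p : Int × Int) : List Char → List (Int × Int)
  | [] => []
  | c :: t =>
    let q := (p.1 + (part2Delta c).1, p.2 + (part2Delta c).2)
    q :: part2Traj q t

-- alternate elements of two lists, first list first
def part2Inter : List (Int × Int) → List (Int × Int) → List (Int × Int)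
  | [], ys => ys
  | x :: xs, ys => x :: part2Inter ys xs
termination_by xs ys => xs.length + ys.length
decreasing_by simp; omega

theorem part2_mem_inter (y : Int × Int) :
    ∀ xs ys, y ∈ part2Inter xs ys ↔ y ∈ xs ∨ y ∈ ys := by
  intro xs ys
  induction xs, ys using part2Inter.induct with
  | case1 ys => simp [part2Inter]
  | case2 x xs ys ih => rw [part2Inter]; simp [ih]; tauto

-- A's per-command update is exactly "move the current agent by delta, append its position, flip the turn"
theorem part2Step_eq (locs : List (Int × Int)) (s r : Int × Int) (turn : Bool) (c : Char) :
    part2Step (locs, s, r, turn) c =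
      if turn then
        ((locs ++ [(s.1 + (part2Delta c).1, s.2 + (part2Delta c).2)]),
          (s.1 + (part2Delta c).1, s.2 + (part2Delta c).2), r, false)
      else
        ((locs ++ [(r.1 + (part2Delta c).1, r.2 + (part2Delta c).2)]),
          s, (r.1 + (part2Delta c).1, r.2 + (part2Delta c).2), true) := by
  simp only [part2Step, part2Delta]
  split_ifs <;> cases turn <;> simp_all <;> omega

-- A's loop appends the interleaving of the two agents' trajectories over the parity-split commands
theorem part2_foldl_locs :
    ∀ (l : List Char) (locs : List (Int × Int)) (s r : Int × Int),
      (l.foldl part2Step (locs, s, r, true)).1 =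
        locs ++ part2Inter (part2Traj s (part2Split l).1) (part2Traj r (part2Split l).2) := by
  intro l
  induction l using part2Split.induct with
  | case1 => simp [part2Split, part2Inter, part2Traj]
  | case2 c =>
    intro locs s r
    simp [part2Split, part2Traj, part2Inter, List.foldl, part2Step_eq]
  | case3 c d rest sc rc hsplit ih =>
    intro locs s r
    simp only [List.foldl, part2Step_eq, Bool.false_eq_true, if_true, if_false]
    rw [ih]
    simp [part2Split, hsplit, part2Traj, part2Inter]

-- B's walker accumulates exactly the trajectory into the seen-set
theorem part2_foldl_visits :
    ∀ (l : List Char) (p : Int × Int) (seen : PySem.Set (Int × Int)),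
      (l.foldl part2VisitStep (p, seen)).2 =
        (part2Traj p l).foldl (fun s b => PySem.Set.add s b) seen := by
  intro l
  induction l with
  | nil => intro p seen; simp [part2Traj]
  | cons c t ih => intro p seen; simp [part2Traj, part2VisitStep, List.foldl, ih]

theorem part2_visits_eq (l : List Char) :
    part2Visits l =
      PySem.Set.update (PySem.Set.ofList [((0 : Int), (0 : Int))]) (part2Traj ((0 : Int), (0 : Int)) l) := by
  rw [part2Visits, part2_foldl_visits]
  have h := PySem.Set.update_map_eq_foldl_add
    (s := PySem.Set.ofList [((0 : Int), (0 : Int))])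
    (l := part2Traj ((0 : Int), (0 : Int)) l) (f := fun b => b)
  rw [List.map_id'] at h
  exact h.symm

theorem part2_mem_visits (l : List Char) (y : Int × Int) :
    y ∈ part2Visits l ↔ y = ((0 : Int), (0 : Int)) ∨ y ∈ part2Traj ((0 : Int), (0 : Int)) l := by
  rw [part2_visits_eq, PySem.Set.mem_update]
  simp [PySem.Set.mem_ofList]

theorem part2_nodup_visits (l : List Char) : (part2Visits l).Nodup := by
  rw [part2_visits_eq]
  exact PySem.Set.nodup_update _ _ (by simp [PySem.Set.ofList])

-- ===== VERDICT (by name: the statement is the Claim_ definition above) =====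
theorem part2_spec : Claim_equal_part2 := by
  intro commands _
  unfold Spec_part2 part2 part2_alt
  set l := commands.toList
  set tS := part2Traj ((0 : Int), (0 : Int)) (part2Split l).1
  set tR := part2Traj ((0 : Int), (0 : Int)) (part2Split l).2
  have hA : (l.foldl part2Step ([((0 : Int), (0 : Int))], (0, 0), (0, 0), true)).1 =
      [((0 : Int), (0 : Int))] ++ part2Inter tS tR := part2_foldl_locs l _ _ _
  have hperm :
      (PySem.Set.ofList (l.foldl part2Step ([((0 : Int), (0 : Int))], (0, 0), (0, 0), true)).1).Perm
        (PySem.Set.union (part2Visits (part2Split l).1) (part2Visits (part2Split l).2)) := by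
    rw [List.perm_ext_iff_of_nodup (PySem.Set.nodup_ofList _)
      (PySem.Set.nodup_union _ _ (part2_nodup_visits _))]
    intro y
    rw [PySem.Set.mem_union, PySem.Set.mem_ofList, hA, part2_mem_visits, part2_mem_visits]
    simp [part2_mem_inter, tS, tR]
    tauto
  have hsf := part2_split_fold l 0 [] [] (by decide)
  simp only [List.nil_append] at hsf
  simp [hperm.length_eq, hsf]
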